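-- pv_equiv track=rewrite | github.com/chaos-ad/dlsyscourse-hw4 | python/needle/ops.py | get_padded_shape
-- ===== SOURCE A (Python) =====
-- def get_padded_shape(original_shape, folded_axes_ids):
--     if folded_axes_ids is None:
--         folded_axes_ids = range(len(original_shape))
--     elif isinstance(folded_axes_ids, tuple):
--         folded_axes_ids = list(folded_axes_ids)
--     elif isinstance(folded_axes_ids, int):
--         folded_axes_ids = [folded_axes_ids]
--     else:
--         raise Exception(f"Unexpected argument type: {type(folded_axes_ids)=}")
--
--
--     for idx, folded_axis_id in enumerate(folded_axes_ids):
--         if folded_axis_id < 0: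
--             folded_axes_ids[idx] = len(original_shape) + folded_axis_id
--
--     result = []
--     for axis_idx, axis_size in enumerate(original_shape):
--         if axis_idx in folded_axes_ids:
--             result.append(1)
--         else:
--             result.append(axis_size)
--
--     return result
-- ===== SOURCE B (Python) =====
-- def get_padded_shape(original_shape, folded_axes_ids):
--     if folded_axes_ids is None:
--         return [1] * len(original_shape)
--     if isinstance(folded_axes_ids, int):
--         folded_axes_ids = (folded_axes_ids,)
--     elif not isinstance(folded_axes_ids, tuple):
--         raise Exception(f"Unexpected argument type: {type(folded_axes_ids)=}")
--     n = len(original_shape)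
--     result = list(original_shape)
--     for a in folded_axes_ids:
--         i = a if a >= 0 else n + a
--         if 0 <= i < n:
--             result[i] = 1
--     return result
-- ===== Notes on version B (the rewrite author's own statement) =====
-- stated objective: simpler
-- what changed: B replaces A's normalize-then-scan-every-axis-with-a-membership-test by copying the shape once and directly scattering 1s at the bound-checked folded positions; the None case becomes a closed-form [1]*n.
import Mathlib
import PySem

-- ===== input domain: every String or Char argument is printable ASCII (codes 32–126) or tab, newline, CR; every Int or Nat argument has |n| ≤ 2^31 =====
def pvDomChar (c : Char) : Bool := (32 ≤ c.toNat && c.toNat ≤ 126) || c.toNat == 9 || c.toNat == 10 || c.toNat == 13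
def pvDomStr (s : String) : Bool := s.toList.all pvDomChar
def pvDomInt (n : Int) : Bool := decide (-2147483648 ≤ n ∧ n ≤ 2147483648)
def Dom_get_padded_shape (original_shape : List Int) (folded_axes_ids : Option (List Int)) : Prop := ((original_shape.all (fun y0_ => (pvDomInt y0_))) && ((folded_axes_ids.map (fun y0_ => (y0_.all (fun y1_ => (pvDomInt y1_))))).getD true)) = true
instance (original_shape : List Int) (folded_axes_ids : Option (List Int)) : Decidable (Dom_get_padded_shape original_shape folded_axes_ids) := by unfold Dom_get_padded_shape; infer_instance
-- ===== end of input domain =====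

-- B replaces A's normalize-then-scan-every-axis-with-a-membership-test by copying the shape and
-- scattering 1s at the bound-checked folded positions (objective: simpler).

-- ===== PORT A =====
-- A: dispatch the folded ids (None -> range(len)), normalize negatives in place, then scan every
-- axis appending 1 on membership, the original size otherwise.
def get_padded_shape (original_shape : List Int) (folded_axes_ids : Option (List Int)) : List Int :=
  let ids : List Int :=
    match folded_axes_ids with
    | none => PySem.List.pyRange 0 (original_shape.length : Int) 1
    | some l => l
  let ids := ids.map (fun x => if x < 0 then (original_shape.length : Int) + x else x)
  (PySem.List.enumerate original_shape 0).foldl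
    (fun res p => if p.1 ∈ ids then res ++ [(1 : Int)] else res ++ [p.2]) []

-- ===== PORT B =====
-- B: None -> [1]*n; otherwise copy the shape and write 1 at each in-range (possibly negative) id.
def get_padded_shape_alt (original_shape : List Int) (folded_axes_ids : Option (List Int)) : List Int :=
  match folded_axes_ids with
  | none => original_shape.map (fun _ => (1 : Int))
  | some ids =>
      ids.foldl
        (fun res a =>
          let i : Int := if a ≥ 0 then a else (original_shape.length : Int) + a
          if 0 ≤ i ∧ i < (original_shape.length : Int) then res.set i.toNat 1 else res)
        original_shape

-- ===== PRECONDITION & SPEC =====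
def Spec_get_padded_shape (original_shape : List Int) (folded_axes_ids : Option (List Int)) (out : List Int) : Prop := out = get_padded_shape_alt original_shape folded_axes_ids
instance (original_shape : List Int) (folded_axes_ids : Option (List Int)) (out : List Int) : Decidable (Spec_get_padded_shape original_shape folded_axes_ids out) := by unfold Spec_get_padded_shape; infer_instance

-- ===== CLAIM (what is proved, stated in full; the proofs are below) =====
def Claim_equal_get_padded_shape : Prop := ∀ (original_shape : List Int) (folded_axes_ids : Option (List Int)), Dom_get_padded_shape original_shape folded_axes_ids → Spec_get_padded_shape original_shape folded_axes_ids (get_padded_shape original_shape folded_axes_ids)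

-- ===== LEMMAS AND PROOFS =====

-- A's output scan, as a structural recursion (result of the second loop starting at index k).
def pvGA (ids : List Int) : List Int → Int → List Int
  | [], _ => []
  | x :: xs, k => (if k ∈ ids then 1 else x) :: pvGA ids xs (k + 1)

lemma pvGA_foldl (ids : List Int) (s : List Int) (k : Int) (acc : List Int) :
    (PySem.List.enumerate s k).foldl
      (fun res p => if p.1 ∈ ids then res ++ [(1 : Int)] else res ++ [p.2]) acc
      = acc ++ pvGA ids s k := by
  induction s generalizing k acc with
  | nil => simp [PySem.List.enumerate_nil, pvGA]
  | cons x xs ih =>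
      rw [PySem.List.enumerate_cons]
      simp only [List.foldl_cons]
      by_cases h : k ∈ ids <;> simp [h, pvGA, ih, List.append_assoc]

lemma pvGA_getElem? (ids : List Int) (s : List Int) (k : Int) (j : Nat) :
    (pvGA ids s k)[j]? = s[j]?.map (fun x => if (k + (j : Int)) ∈ ids then 1 else x) := by
  induction s generalizing k j with
  | nil => simp [pvGA]
  | cons x xs ih =>
      cases j with
      | zero => simp [pvGA]
      | succ j =>
          simp only [pvGA, List.getElem?_cons_succ, ih]
          rw [show k + ((j + 1 : Nat) : Int) = (k + 1) + (j : Int) by push_cast; ring]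

lemma pvFoldB_length (n : Int) (ids : List Int) (res : List Int) :
    (ids.foldl
      (fun res a =>
        let i : Int := if a ≥ 0 then a else n + a
        if 0 ≤ i ∧ i < n then res.set i.toNat 1 else res) res).length = res.length := by
  induction ids generalizing res with
  | nil => rfl
  | cons a ids ih =>
      simp only [List.foldl_cons]
      rw [ih]
      split <;> split <;> first | rw [List.length_set] | rfl

lemma pvFoldB_getElem? (n : Int) (ids : List Int) (res : List Int)
    (hres : (res.length : Int) = n) (j : Nat) (hj : (j : Int) < n) :
    (ids.foldl
      (fun res a =>
        let i : Int := if a ≥ 0 then a else n + a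
        if 0 ≤ i ∧ i < n then res.set i.toNat 1 else res) res)[j]?
    = if ((j : Int) ∈ ids.map (fun a => if a ≥ 0 then a else n + a)) then some 1 else res[j]? := by
  induction ids generalizing res with
  | nil => simp
  | cons a ids ih =>
      simp only [List.foldl_cons]
      set i : Int := if a ≥ 0 then a else n + a with hi
      have hlen : ((if 0 ≤ i ∧ i < n then res.set i.toNat 1 else res).length : Int) = n := by
        split <;> simpa using hres
      rw [ih _ hlen]
      by_cases hm : (j : Int) ∈ ids.map (fun a => if a ≥ 0 then a else n + a)
      · rw [if_pos hm, List.map_cons, if_pos (List.mem_cons_of_mem _ hm)]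
      · rw [if_neg hm]
        by_cases hij : i = (j : Int)
        · have hg : 0 ≤ i ∧ i < n := by constructor <;> omega
          have hjlt : j < res.length := by omega
          have hmc : (j : Int) ∈ ((a :: ids).map (fun a => if a ≥ 0 then a else n + a)) := by
            rw [List.map_cons, ← hi, hij]
            exact List.mem_cons_self
          rw [if_pos hmc, if_pos hg, show i.toNat = j by omega,
            List.getElem?_set_self', List.getElem?_eq_getElem hjlt]
          rfl
        · have hmc : (j : Int) ∉ ((a :: ids).map (fun a => if a ≥ 0 then a else n + a)) := by
            rw [List.map_cons]
            intro hx
            rcases List.mem_cons.mp hx with h | h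
            · exact hij (by rw [hi]; omega)
            · exact hm h
          rw [if_neg hmc]
          split
          · exact List.getElem?_set_ne (by omega)
          · rfl

lemma pvNorm_funext (n : Int) :
    (fun a : Int => if a ≥ 0 then a else n + a) = (fun x : Int => if x < 0 then n + x else x) := by
  funext a; split_ifs <;> omega

-- ===== VERDICT (by name: the statement is the Claim_ definition above) =====
theorem get_padded_shape_spec : Claim_equal_get_padded_shape := by
  intro s f _
  unfold Spec_get_padded_shape get_padded_shape get_padded_shape_alt
  cases f with
  | none =>
      simp only []
      rw [pvGA_foldl]
      apply List.ext_getElem?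
      intro j
      rw [List.nil_append, pvGA_getElem?, List.getElem?_map]
      cases hsj : s[j]? with
      | none => rfl
      | some x =>
          have hj : j < s.length := (List.getElem?_eq_some_iff.mp hsj).1
          have hmem : ((0 : Int) + (j : Int)) ∈
              (PySem.List.pyRange 0 (s.length : Int) 1).map
                (fun x => if x < 0 then (s.length : Int) + x else x) := by
            refine List.mem_map.mpr ⟨(j : Int), ?_, ?_⟩
            · exact PySem.List.mem_pyRange_one.mpr ⟨by omega, by exact_mod_cast hj⟩
            · rw [if_neg (by omega)]; omega
          rw [Option.map_some, Option.map_some, if_pos hmem]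
  | some ids =>
      simp only []
      rw [pvGA_foldl]
      apply List.ext_getElem?
      intro j
      rw [List.nil_append, pvGA_getElem?]
      by_cases hj : j < s.length
      · rw [pvFoldB_getElem? (s.length : Int) ids s rfl j (by exact_mod_cast hj)]
        rw [pvNorm_funext]
        have hsj : s[j]? = some s[j] := List.getElem?_eq_getElem hj
        rw [hsj, Option.map_some, zero_add]
        by_cases hm : ((j : Int)) ∈ ids.map (fun x : Int => if x < 0 then (s.length : Int) + x else x)
        · rw [if_pos hm, if_pos hm]
        · rw [if_neg hm, if_neg hm]
      · have h1 : s[j]? = none := List.getElem?_eq_none (by omega)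
        have h2 : (ids.foldl
            (fun res a =>
              let i : Int := if a ≥ 0 then a else (s.length : Int) + a
              if 0 ≤ i ∧ i < (s.length : Int) then res.set i.toNat 1 else res) s)[j]? = none := by
          apply List.getElem?_eq_none
          rw [pvFoldB_length]; omega
        rw [h1, h2, Option.map_none]
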